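-- pv_equiv track=rewrite | github.com/michaelayoade/dotmac_framework | src/dotmac_sdk_core/utils/header_utils.py | extract_tenant_context
-- ===== SOURCE A (Python) =====
-- from typing import Any, Dict, Optional, Tuple
--
-- def extract_tenant_context(headers: Dict[str, str]) -> Optional[str]:
--     """
--     Extract tenant context from headers.
--
--     Args:
--         headers: HTTP headers dictionary
--
--     Returns:
--         Tenant ID or None
--     """
--     # Try common tenant header names
--     tenant_headers = [
--         "X-Tenant-ID",
--         "X-Tenant-Id",
--         "X-TenantId",
--         "Tenant-ID",
--         "Tenant-Id",
--         "TenantId",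
--     ]
--
--     for header_name in tenant_headers:
--         if header_name in headers:
--             return headers[header_name]
--
--         # Try case-insensitive lookup
--         for key, value in headers.items():
--             if key.lower() == header_name.lower():
--                 return value
--
--     return None
-- ===== SOURCE B (Python) =====
-- def extract_tenant_context(headers):
--     """Extract tenant context from headers (single lowered-key index + ordered candidate probe)."""
--     tenant_headers = [
--         "X-Tenant-ID",
--         "X-Tenant-Id",
--         "X-TenantId",
--         "Tenant-ID",
--         "Tenant-Id",
--         "TenantId",
--     ]
--     lower_map = {}
--     for key, value in headers.items():
--         lk = key.lower()
--         if lk not in lower_map: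
--             lower_map[lk] = value
--     for name in tenant_headers:
--         if name in headers:
--             return headers[name]
--         ln = name.lower()
--         if ln in lower_map:
--             return lower_map[ln]
--     return None
-- ===== Notes on version B (the rewrite author's own statement) =====
-- stated objective: alternative
-- what changed: Replaced A's per-candidate rescans of all headers with a single pass building a first-occurrence lowercase-key index, followed by dict lookups per candidate.
import Mathlib
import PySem

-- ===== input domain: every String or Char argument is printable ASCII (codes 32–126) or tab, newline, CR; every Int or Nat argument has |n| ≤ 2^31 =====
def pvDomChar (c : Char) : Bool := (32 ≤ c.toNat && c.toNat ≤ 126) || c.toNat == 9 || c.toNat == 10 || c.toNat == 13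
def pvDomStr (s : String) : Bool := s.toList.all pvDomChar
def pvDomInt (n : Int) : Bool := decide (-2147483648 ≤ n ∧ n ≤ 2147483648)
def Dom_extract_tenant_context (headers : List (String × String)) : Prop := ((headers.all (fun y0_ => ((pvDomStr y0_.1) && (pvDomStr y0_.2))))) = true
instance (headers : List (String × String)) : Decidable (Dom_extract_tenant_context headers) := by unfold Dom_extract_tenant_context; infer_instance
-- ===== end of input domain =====

-- B replaces A's per-candidate rescans by one lowered-key first-occurrence index built in a single pass.

-- ===== PORT A =====
-- the candidate header names, identical literal data in A and B (shared)
def etcTenantHeaders : List String :=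
  ["X-Tenant-ID", "X-Tenant-Id", "X-TenantId", "Tenant-ID", "Tenant-Id", "TenantId"]

-- inner loop of A: first value whose lowercased key equals the lowercased candidate
def etcScanA (headers : List (String × String)) (name : String) : Option String :=
  match headers with
  | [] => none
  | (k, v) :: rest =>
      if PySem.Str.lower k == PySem.Str.lower name then some v else etcScanA rest name

def etcLoopA (headers : List (String × String)) : List String → Option String
  | [] => none
  | name :: rest =>
      if headers.any (fun p => p.1 == name) then headers.lookup name
      else
        match etcScanA headers name with
        | some v => some v
        | none => etcLoopA headers rest

def extract_tenant_context (headers : List (String × String)) : Option String :=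
  etcLoopA headers etcTenantHeaders

-- ===== PORT B =====
-- one step of B's index-building loop: insert (key.lower(), value) if the lowered key is absent
def etcLowerMapStep (m : List (String × String)) (kv : String × String) : List (String × String) :=
  if m.any (fun p => p.1 == PySem.Str.lower kv.1) then m
  else m ++ [(PySem.Str.lower kv.1, kv.2)]

def etcLowerMap (headers : List (String × String)) : List (String × String) :=
  headers.foldl etcLowerMapStep []

def etcLoopB (headers lmap : List (String × String)) : List String → Option String
  | [] => none
  | name :: rest =>
      match headers.lookup name with
      | some v => some v
      | none =>
          match lmap.lookup (PySem.Str.lower name) with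
          | some v => some v
          | none => etcLoopB headers lmap rest

def extract_tenant_context_alt (headers : List (String × String)) : Option String :=
  etcLoopB headers (etcLowerMap headers) etcTenantHeaders

-- ===== PRECONDITION & SPEC =====
def Spec_extract_tenant_context (headers : List (String × String)) (out : Option String) : Prop := out = extract_tenant_context_alt headers
instance (headers : List (String × String)) (out : Option String) : Decidable (Spec_extract_tenant_context headers out) := by unfold Spec_extract_tenant_context; infer_instance

-- ===== CLAIM (what is proved, stated in full; the proofs are below) =====
def Claim_equal_extract_tenant_context : Prop := ∀ (headers : List (String × String)), Dom_extract_tenant_context headers → Spec_extract_tenant_context headers (extract_tenant_context headers)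

-- ===== LEMMAS AND PROOFS =====

theorem etc_any_eq_lookup_isSome (headers : List (String × String)) (name : String) :
    headers.any (fun p => p.1 == name) = (headers.lookup name).isSome := by
  induction headers with
  | nil => rfl
  | cons p rest ih =>
      obtain ⟨k, v⟩ := p
      by_cases h : k = name
      · simp [List.lookup, h]
      · have h2 : (name == k) = false := by simp [Ne.symm h]
        simp [List.lookup, h, h2, ih]

theorem etc_lookup_append_single (m : List (String × String)) (k v t : String) :
    (m ++ [(k, v)]).lookup t =
      match m.lookup t with
      | some w => some w
      | none => if k == t then some v else none := by
  induction m with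
  | nil =>
      by_cases h : k = t
      · simp [List.lookup, h]
      · have h2 : (t == k) = false := by simp [Ne.symm h]
        have h3 : (k == t) = false := by simp [h]
        simp [List.lookup, h2, h3]
  | cons p rest ih =>
      obtain ⟨k', v'⟩ := p
      by_cases h : t = k'
      · simp [List.lookup, h]
      · have h2 : (t == k') = false := by simp [h]
        simp only [List.cons_append, List.lookup, h2, ih]

theorem etc_lowerMap_lookup (l : List (String × String)) :
    ∀ (acc : List (String × String)) (name : String),
    (l.foldl etcLowerMapStep acc).lookup (PySem.Str.lower name) =
      match acc.lookup (PySem.Str.lower name) with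
      | some w => some w
      | none => etcScanA l name := by
  induction l with
  | nil =>
      intro acc name
      cases h : acc.lookup (PySem.Str.lower name) <;> simp [h, etcScanA]
  | cons p rest ih =>
      intro acc name
      obtain ⟨k, v⟩ := p
      simp only [List.foldl_cons, etcLowerMapStep, etcScanA]
      by_cases hmem : acc.any (fun p => p.1 == PySem.Str.lower k) = true
      · -- lowered key already present: the step leaves acc unchanged
        rw [if_pos hmem, ih acc name]
        rw [etc_any_eq_lookup_isSome] at hmem
        by_cases heq : PySem.Str.lower k = PySem.Str.lower name
        · cases h : acc.lookup (PySem.Str.lower name) with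
          | none => rw [heq, h] at hmem; simp at hmem
          | some w => simp
        · have hbeq : (PySem.Str.lower k == PySem.Str.lower name) = false := by simp [heq]
          simp [hbeq]
      · -- lowered key absent: the step appends (lower k, v)
        rw [if_neg hmem, ih _ name, etc_lookup_append_single]
        rw [etc_any_eq_lookup_isSome] at hmem
        simp only [Bool.not_eq_true, Option.isSome_eq_false_iff, Option.isNone_iff_eq_none] at hmem
        cases h : acc.lookup (PySem.Str.lower name) with
        | some w =>
            by_cases heq : PySem.Str.lower k = PySem.Str.lower name
            · simp [heq, h] at hmem
            · simp
        | none =>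
            by_cases heq : PySem.Str.lower k = PySem.Str.lower name
            · simp [heq]
            · have hbeq : (PySem.Str.lower k == PySem.Str.lower name) = false := by simp [heq]
              simp [hbeq]

theorem etc_loop_eq (headers : List (String × String)) (names : List String) :
    etcLoopA headers names = etcLoopB headers (etcLowerMap headers) names := by
  induction names with
  | nil => rfl
  | cons name rest ih =>
      simp only [etcLoopA, etcLoopB, etc_any_eq_lookup_isSome,
        etcLowerMap, etc_lowerMap_lookup, ih]
      cases h : headers.lookup name <;> simp

-- ===== VERDICT (by name: the statement is the Claim_ definition above) =====
theorem extract_tenant_context_spec : Claim_equal_extract_tenant_context := by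
  intro headers _
  unfold Spec_extract_tenant_context extract_tenant_context extract_tenant_context_alt
  exact etc_loop_eq headers _
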